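-- pv_equiv track=rewrite | github.com/omurkoc/enhanced-sentiment-analysis | sentiment_analysis_with_negation.py | handle_negation
-- ===== SOURCE A (Python) =====
-- negation_words = ['not', "don't", "didn't", "isn't", "wasn't", "aren't", "weren't", "won't", "wouldn't",
--                   "shouldn't", "can't", "couldn't", "no", "never", "none", "nor", "n't"]
--
-- def handle_negation(text):
--     words = text.split()
--     result = []
--     negate = False
--     for word in words:
--         if word in negation_words:
--             negate = True
--             result.append(word)
--         elif negate:
--             result.append("not_" + word)
--             negate = False
--         else:
--             result.append(word)
--     return " ".join(result)
-- ===== SOURCE B (Python) =====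
-- negation_words = ['not', "don't", "didn't", "isn't", "wasn't", "aren't", "weren't", "won't", "wouldn't",
--                   "shouldn't", "can't", "couldn't", "no", "never", "none", "nor", "n't"]
--
-- def handle_negation(text):
--     # Divide and conquer over the index range: each output word depends only on
--     # its immediate predecessor, so the transform of words[lo:hi] is the
--     # concatenation of the transforms of the two halves (locality), and the
--     # single-word base case does a direct lookback at words[lo-1].
--     words = text.split()
--
--     def transform(lo, hi):
--         if hi - lo <= 0:
--             return []
--         if hi - lo == 1:
--             w = words[lo]
--             if w not in negation_words and lo > 0 and words[lo - 1] in negation_words: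
--                 return ["not_" + w]
--             return [w]
--         mid = (lo + hi) // 2
--         return transform(lo, mid) + transform(mid, hi)
--
--     return " ".join(transform(0, len(words)))
-- ===== Notes on version B (the rewrite author's own statement) =====
-- stated objective: alternative
-- what changed: A's sequential loop threading a mutable negate flag is replaced by a balanced divide-and-conquer over the index range: the transform is local (each output word depends only on its immediate predecessor), so halves are transformed independently by tree recursion and concatenated, with a direct lookback base case.
import Mathlib
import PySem

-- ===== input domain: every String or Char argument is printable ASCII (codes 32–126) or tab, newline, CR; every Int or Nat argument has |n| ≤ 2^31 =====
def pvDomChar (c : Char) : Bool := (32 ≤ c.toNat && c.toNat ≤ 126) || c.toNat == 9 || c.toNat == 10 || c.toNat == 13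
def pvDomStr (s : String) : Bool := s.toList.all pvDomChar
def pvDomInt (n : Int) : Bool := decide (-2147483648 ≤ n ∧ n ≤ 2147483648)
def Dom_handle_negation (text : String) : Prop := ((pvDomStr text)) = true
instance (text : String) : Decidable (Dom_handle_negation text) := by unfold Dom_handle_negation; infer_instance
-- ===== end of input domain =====

-- B replaces A's sequential flag-threading loop by a balanced divide-and-conquer
-- over the index range (each output word depends only on its predecessor).

-- ===== PORT A =====
def negation_words : List String := ["not", "don't", "didn't", "isn't", "wasn't", "aren't", "weren't", "won't", "wouldn't",
  "shouldn't", "can't", "couldn't", "no", "never", "none", "nor", "n't"]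

-- the for-loop of A: state = (result, negate)
def hnLoop : List String → List String → Bool → List String
  | [], result, _ => result
  | w :: ws, result, negate =>
    if w ∈ negation_words then hnLoop ws (result ++ [w]) true
    else if negate then hnLoop ws (result ++ ["not_" ++ w]) false
    else hnLoop ws (result ++ [w]) false

def handle_negation (text : String) : String :=
  PySem.Str.join " " (hnLoop (PySem.Str.split₀ text) [] false)

-- ===== PORT B =====
-- B's `transform(lo, hi)`: lo and hi are always in [0, len(words)] with lo ≤ hi,
-- so `words[lo]` / `words[lo-1]` are in range and ported as getD (exact here).
def dcTransform (words : List String) (lo hi : Nat) : List String :=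
  if hi ≤ lo then []
  else if hi - lo = 1 then
    let w := words.getD lo ""
    if w ∉ negation_words ∧ 0 < lo ∧ words.getD (lo - 1) "" ∈ negation_words
    then ["not_" ++ w] else [w]
  else
    let mid := (lo + hi) / 2
    dcTransform words lo mid ++ dcTransform words mid hi
termination_by hi - lo
decreasing_by all_goals omega

def handle_negation_alt (text : String) : String :=
  let words := PySem.Str.split₀ text
  PySem.Str.join " " (dcTransform words 0 words.length)

-- ===== PRECONDITION & SPEC =====
def Spec_handle_negation (text : String) (out : String) : Prop := out = handle_negation_alt text
instance (text : String) (out : String) : Decidable (Spec_handle_negation text out) := by unfold Spec_handle_negation; infer_instance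

-- ===== CLAIM =====
def Claim_equal_handle_negation : Prop := ∀ (text : String), Dom_handle_negation text → Spec_handle_negation text (handle_negation text)

-- ===== LEMMAS AND PROOFS =====

-- the transform of the single word at index i (the common index-wise description)
def stepAt (words : List String) (i : Nat) : String :=
  let w := words.getD i ""
  if w ∉ negation_words ∧ 0 < i ∧ words.getD (i - 1) "" ∈ negation_words
  then "not_" ++ w else w

-- B's divide and conquer computes stepAt pointwise over the index range
theorem dcTransform_eq_map (words : List String) (lo hi : Nat) (h : lo ≤ hi) :
    dcTransform words lo hi = (List.range' lo (hi - lo)).map (stepAt words) := by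
  generalize hm : hi - lo = m
  induction m using Nat.strong_induction_on generalizing lo hi with
  | _ m ih =>
    rw [dcTransform]
    by_cases h0 : hi ≤ lo
    · have : m = 0 := by omega
      simp [h0, this]
    · by_cases h1 : hi - lo = 1
      · have : m = 1 := by omega
        subst this
        simp only [h0, if_false, h1, if_true, List.range'_one, List.map]
        simp only [stepAt]
        split_ifs <;> rfl
      · have hmid1 : lo < (lo + hi) / 2 := by omega
        have hmid2 : (lo + hi) / 2 < hi := by omega
        simp only [h0, if_false, h1, if_false]
        rw [ih ((lo + hi) / 2 - lo) (by omega) lo ((lo + hi) / 2) (by omega) rfl,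
            ih (hi - (lo + hi) / 2) (by omega) ((lo + hi) / 2) hi (by omega) rfl]
        rw [← List.map_append]
        have h2 : (lo + hi) / 2 = lo + 1 * ((lo + hi) / 2 - lo) := by omega
        have h3 : m = ((lo + hi) / 2 - lo) + (hi - (lo + hi) / 2) := by omega
        rw [h3, ← List.range'_append, ← h2]

-- A's loop appended to the accumulator, expressed word-by-word
def pieces : Bool → List String → List String
  | _, [] => []
  | b, w :: ws =>
    (if w ∈ negation_words then w else if b then "not_" ++ w else w) :: pieces (w ∈ negation_words) ws

theorem hnLoop_eq_pieces (ws : List String) :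
    ∀ (res : List String) (b : Bool), hnLoop ws res b = res ++ pieces b ws := by
  induction ws with
  | nil => intro res b; simp [hnLoop, pieces]
  | cons w ws ih =>
    intro res b
    by_cases hw : w ∈ negation_words
    · simp [hnLoop, pieces, hw, ih]
    · by_cases hb : b <;> simp [hnLoop, pieces, hw, hb, ih]

-- the flag entering position pre.length equals "last word of pre is a negation word"
def lastNeg : List String → Bool
  | [] => false
  | [w] => w ∈ negation_words
  | _ :: ws => lastNeg ws

theorem lastNeg_append (pre : List String) (w : String) :
    lastNeg (pre ++ [w]) = decide (w ∈ negation_words) := by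
  induction pre with
  | nil => simp [lastNeg]
  | cons p ps ih =>
    cases ps with
    | nil => simp [lastNeg]
    | cons q qs => simpa [lastNeg] using ih

theorem lastNeg_eq_getLast (p : String) (ps : List String) :
    lastNeg (p :: ps) = decide ((p :: ps).getLast (List.cons_ne_nil p ps) ∈ negation_words) := by
  induction ps generalizing p with
  | nil => simp [lastNeg]
  | cons q qs ih => simpa [lastNeg, List.getLast] using ih q

theorem getD_append_len (pre ws : List String) (w : String) :
    (pre ++ w :: ws).getD pre.length "" = w := by
  simp [List.getD_eq_getElem?_getD]

theorem getD_append_pred (p : String) (ps ws : List String) (w : String) :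
    ((p :: ps) ++ w :: ws).getD ((p :: ps).length - 1) ""
      = (p :: ps).getLast (List.cons_ne_nil p ps) := by
  rw [List.getD_eq_getElem?_getD, List.getElem?_append_left (by simp)]
  rw [List.getLast_eq_getElem]
  simp only [List.getD_getElem?]
  rw [dif_pos (by simp)]
  rfl

theorem stepAt_head (pre ws : List String) (w : String) :
    stepAt (pre ++ w :: ws) pre.length
      = (if w ∈ negation_words then w else if lastNeg pre then "not_" ++ w else w) := by
  unfold stepAt
  rw [getD_append_len]
  cases pre with
  | nil => by_cases hw : w ∈ negation_words <;> simp [lastNeg, hw]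
  | cons p ps =>
    rw [getD_append_pred, lastNeg_eq_getLast]
    by_cases hw : w ∈ negation_words
    · simp [hw]
    · by_cases hp : (p :: ps).getLast (List.cons_ne_nil p ps) ∈ negation_words <;>
        simp [hw, hp]

theorem pieces_eq_map (ws : List String) :
    ∀ (pre : List String), pieces (lastNeg pre) ws
      = (List.range' pre.length ws.length).map (stepAt (pre ++ ws)) := by
  induction ws with
  | nil => intro pre; simp [pieces]
  | cons w ws ih =>
    intro pre
    have hrange : List.range' pre.length (w :: ws).length
        = pre.length :: List.range' (pre ++ [w]).length ws.length := by
      simp [List.range'_succ]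
    rw [hrange, List.map]
    have htail : pieces (decide (w ∈ negation_words)) ws
        = (List.range' (pre ++ [w]).length ws.length).map (stepAt (pre ++ w :: ws)) := by
      have h := ih (pre ++ [w])
      rw [lastNeg_append] at h
      simpa using h
    rw [pieces, htail, stepAt_head]

-- ===== VERDICT =====
theorem handle_negation_spec : Claim_equal_handle_negation := by
  intro text _
  simp only [Spec_handle_negation, handle_negation, handle_negation_alt]
  rw [hnLoop_eq_pieces, dcTransform_eq_map _ _ _ (Nat.zero_le _)]
  have h := pieces_eq_map (PySem.Str.split₀ text) []
  simp only [lastNeg, List.nil_append, List.length_nil] at h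
  rw [List.nil_append, h, Nat.sub_zero]
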